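-- pv_equiv track=rewrite | github.com/Coki628/kyopro_submissions | CodeForces/1451a.py | bfs
-- ===== SOURCE A (Python) =====
-- def bfs(src):
--     """ BFS(整数) """
--     from collections import deque
--
--     que = deque([src])
--     dist = {}
--     dist[src] = 0
--     while que:
--         u = que.popleft()
--         if u <= 1:
--             continue
--         if u != 2 and u % 2 == 0:
--             v = u // (u//2)
--             if v not in dist:
--                 dist[v] = dist[u] + 1
--                 que.append(v)
--         elif u != 3 and u % 3 == 0:
--             v = u // (u//3)
--             if v not in dist:
--                 dist[v] = dist[u] + 1
--                 que.append(v)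
--         else:
--             v = u - 1
--             if v not in dist:
--                 dist[v] = dist[u] + 1
--                 que.append(v)
--     return dist
-- ===== SOURCE B (Python) =====
-- def bfs(src):
--     """ BFS(整数) """
--     # Two-stage recursive reformulation: first build the (strictly decreasing,
--     # hence duplicate-free) successor chain as a list by structural recursion,
--     # then label each node with its position via enumerate.
--     def step(u):
--         if u != 2 and u % 2 == 0:
--             return u // (u // 2)
--         elif u != 3 and u % 3 == 0:
--             return u // (u // 3)
--         else:
--             return u - 1
--
--     def chain(u):
--         if u <= 1:
--             return [u]
--         return [u] + chain(step(u))
--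
--     return {node: i for i, node in enumerate(chain(src))}
-- ===== Notes on version B (the rewrite author's own statement) =====
-- stated objective: alternative
-- what changed: Replaces the stateful deque-BFS with dict membership checks by a two-stage recursive formulation: a pure recursive function builds the successor chain as a list, and the distance dict is then produced in one enumerate pass over that list.
import Mathlib
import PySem

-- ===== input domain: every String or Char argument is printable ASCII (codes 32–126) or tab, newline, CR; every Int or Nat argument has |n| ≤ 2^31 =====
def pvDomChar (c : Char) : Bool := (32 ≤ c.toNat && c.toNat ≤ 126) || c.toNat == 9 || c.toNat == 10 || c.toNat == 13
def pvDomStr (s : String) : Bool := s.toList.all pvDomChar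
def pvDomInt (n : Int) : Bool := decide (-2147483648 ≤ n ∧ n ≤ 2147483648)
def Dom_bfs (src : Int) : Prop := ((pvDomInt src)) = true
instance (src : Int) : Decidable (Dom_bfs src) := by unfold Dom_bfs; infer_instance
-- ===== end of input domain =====

-- B replaces the stateful deque-BFS by a two-stage recursion: build the successor chain
-- as a list, then enumerate it into the distance dict; objective: alternative.

-- termination helpers for both programs' recursions (cited by name in decreasing_by)
theorem pvStep_lt (u d : Int) (hu : 0 < u) (hd : 2 ≤ d) : PySem.Int.floordiv u d < u := by
  rw [PySem.Int.floordiv_lt_iff_lt_mul (by omega)]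
  have h1 : u * 2 ≤ u * d := mul_le_mul_of_nonneg_left hd (by omega)
  omega

theorem pvHalf_ge_two (u : Int) (hu : 1 < u) (h2 : u ≠ 2) (he : PySem.Int.mod u 2 = 0) :
    2 ≤ PySem.Int.floordiv u 2 := by
  rw [PySem.Int.le_floordiv_iff_mul_le (by omega)]
  obtain ⟨k, hk⟩ := (PySem.Int.mod_eq_zero_iff_dvd u 2).1 he
  omega

theorem pvThird_ge_two (u : Int) (hu : 1 < u) (h3 : u ≠ 3) (he : PySem.Int.mod u 3 = 0) :
    2 ≤ PySem.Int.floordiv u 3 := by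
  rw [PySem.Int.le_floordiv_iff_mul_le (by omega)]
  obtain ⟨k, hk⟩ := (PySem.Int.mod_eq_zero_iff_dvd u 3).1 he
  omega

theorem pvA2_lt (u : Int) (hu : ¬ u ≤ 1) (h2 : u ≠ 2 ∧ PySem.Int.mod u 2 = 0) :
    (PySem.Int.floordiv u (PySem.Int.floordiv u 2)).toNat < u.toNat := by
  have := pvStep_lt u (PySem.Int.floordiv u 2) (by omega) (pvHalf_ge_two u (by omega) h2.1 h2.2)
  omega

theorem pvA3_lt (u : Int) (hu : ¬ u ≤ 1) (h3 : u ≠ 3 ∧ PySem.Int.mod u 3 = 0) :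
    (PySem.Int.floordiv u (PySem.Int.floordiv u 3)).toNat < u.toNat := by
  have := pvStep_lt u (PySem.Int.floordiv u 3) (by omega) (pvThird_ge_two u (by omega) h3.1 h3.2)
  omega

theorem pvSub1_lt (u : Int) (hu : ¬ u ≤ 1) : (u - 1).toNat < u.toNat := by omega

theorem pvMeas_cons (u : Int) (rest : List Int) :
    ((rest.map (fun x => x.toNat + 1)).sum) < (((u :: rest).map (fun x => x.toNat + 1)).sum) := by
  simp
theorem pvMeas_app (u v : Int) (rest : List Int) (h : v.toNat < u.toNat) :
    (((rest ++ [v]).map (fun x => x.toNat + 1)).sum) <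
      (((u :: rest).map (fun x => x.toNat + 1)).sum) := by
  simp; omega

-- ===== PORT A =====
-- dist[u]: u is always a key of dist when dequeued (BFS invariant), so getD is exact here.
def bfsLoopA (que : List Int) (dist : PySem.Dict Int Int) : PySem.Dict Int Int :=
  match que with
  | [] => dist
  | u :: rest =>
    if hu : u ≤ 1 then bfsLoopA rest dist
    else if h2 : u ≠ 2 ∧ PySem.Int.mod u 2 = 0 then
      let v := PySem.Int.floordiv u (PySem.Int.floordiv u 2)
      if dist.contains v then bfsLoopA rest dist
      else bfsLoopA (rest ++ [v]) (dist.insert v (dist.getD u 0 + 1))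
    else if h3 : u ≠ 3 ∧ PySem.Int.mod u 3 = 0 then
      let v := PySem.Int.floordiv u (PySem.Int.floordiv u 3)
      if dist.contains v then bfsLoopA rest dist
      else bfsLoopA (rest ++ [v]) (dist.insert v (dist.getD u 0 + 1))
    else
      let v := u - 1
      if dist.contains v then bfsLoopA rest dist
      else bfsLoopA (rest ++ [v]) (dist.insert v (dist.getD u 0 + 1))
termination_by (que.map (fun x => x.toNat + 1)).sum
decreasing_by
  all_goals first
    | exact pvMeas_cons u rest
    | exact pvMeas_app u _ rest (pvA2_lt u hu h2)
    | exact pvMeas_app u _ rest (pvA3_lt u hu h3)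
    | exact pvMeas_app u _ rest (pvSub1_lt u hu)

def bfs (src : Int) : List (Int × Int) :=
  (bfsLoopA [src] ((PySem.Dict.empty : PySem.Dict Int Int).insert src 0)).items

-- ===== PORT B =====
def stepB (u : Int) : Int :=
  if u ≠ 2 ∧ PySem.Int.mod u 2 = 0 then PySem.Int.floordiv u (PySem.Int.floordiv u 2)
  else if u ≠ 3 ∧ PySem.Int.mod u 3 = 0 then PySem.Int.floordiv u (PySem.Int.floordiv u 3)
  else u - 1

theorem pvStepB_lt (u : Int) (hu : ¬ u ≤ 1) : (stepB u).toNat < u.toNat := by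
  unfold stepB
  split_ifs with h2 h3
  · exact pvA2_lt u hu h2
  · exact pvA3_lt u hu h3
  · exact pvSub1_lt u hu

def chainB (u : Int) : List Int :=
  if hu : u ≤ 1 then [u]
  else [u] ++ chainB (stepB u)
termination_by u.toNat
decreasing_by exact pvStepB_lt u hu

def bfs_alt (src : Int) : List (Int × Int) :=
  (PySem.Dict.ofList ((PySem.List.enumerate (chainB src) 0).map (fun p => (p.2, p.1)))).items

-- ===== PRECONDITION & SPEC =====
def Spec_bfs (src : Int) (out : List (Int × Int)) : Prop := out = bfs_alt src
instance (src : Int) (out : List (Int × Int)) : Decidable (Spec_bfs src out) := by unfold Spec_bfs; infer_instance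

-- ===== CLAIM =====
def Claim_equal_bfs : Prop := ∀ (src : Int), Dom_bfs src → Spec_bfs src (bfs src)

-- ===== LEMMAS AND PROOFS =====

theorem pvChain_head (u : Int) : chainB u = u :: (chainB u).tail := by
  rw [chainB.eq_def]; split_ifs <;> simp

-- A's loop from a single-element queue equals inserting the enumerated tail of B's chain.
theorem pvLoop_eq (n : Nat) : ∀ (u : Int) (dist : PySem.Dict Int Int), u.toNat ≤ n →
    (∀ k ∈ dist.keys, u ≤ k) →
    bfsLoopA [u] dist =
      ((PySem.List.enumerate (chainB u).tail (dist.getD u 0 + 1)).map (fun p => (p.2, p.1))).foldl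
        (fun d p => d.insert p.1 p.2) dist := by
  induction n with
  | zero =>
    intro u dist hn _
    have hu : u ≤ 1 := by omega
    rw [bfsLoopA.eq_def, chainB.eq_def]
    simp [hu, bfsLoopA.eq_def, PySem.List.enumerate_nil]
  | succ n ih =>
    intro u dist hn hinv
    by_cases hu : u ≤ 1
    · rw [bfsLoopA.eq_def, chainB.eq_def]
      simp [hu, bfsLoopA.eq_def, PySem.List.enumerate_nil]
    · have hvlt := pvStepB_lt u hu
      have hch : chainB u = u :: chainB (stepB u) := by rw [chainB.eq_def]; simp [hu]
      have hnot : dist.contains (stepB u) = false := by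
        cases hc : dist.contains (stepB u)
        · rfl
        · exfalso
          have hm : stepB u ∈ dist.keys := by
            have := PySem.Dict.contains_iff_mem_keys (d := dist) (k := stepB u)
            simp [hc] at this
            exact this
          have := hinv _ hm
          omega
      rw [hch]
      simp only [List.tail_cons]
      rw [pvChain_head (stepB u), PySem.List.enumerate_cons]
      simp only [List.map_cons, List.foldl_cons]
      have hkinv : ∀ k ∈ (dist.insert (stepB u) (dist.getD u 0 + 1)).keys, stepB u ≤ k := by
        intro k hk
        rw [PySem.Dict.mem_keys_insert] at hk
        rcases hk with h | h
        · omega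
        · have := hinv k h; omega
      have hIH := ih (stepB u) (dist.insert (stepB u) (dist.getD u 0 + 1)) (by omega) hkinv
      rw [PySem.Dict.getD_insert_self] at hIH
      rw [bfsLoopA.eq_def]
      simp only [hu, dite_false]
      split_ifs with h2 hc h3 hc hc
      · have hs : stepB u = PySem.Int.floordiv u (PySem.Int.floordiv u 2) := by
          unfold stepB; rw [if_pos h2]
        rw [← hs, hnot] at hc; exact Bool.noConfusion hc
      · have hs : stepB u = PySem.Int.floordiv u (PySem.Int.floordiv u 2) := by
          unfold stepB; rw [if_pos h2]
        rw [← hs]; simpa using hIH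
      · have hs : stepB u = PySem.Int.floordiv u (PySem.Int.floordiv u 3) := by
          unfold stepB; rw [if_neg h2, if_pos h3]
        rw [← hs, hnot] at hc; exact Bool.noConfusion hc
      · have hs : stepB u = PySem.Int.floordiv u (PySem.Int.floordiv u 3) := by
          unfold stepB; rw [if_neg h2, if_pos h3]
        rw [← hs]; simpa using hIH
      · have hs : stepB u = u - 1 := by
          unfold stepB; rw [if_neg h2, if_neg h3]
        rw [← hs, hnot] at hc; exact Bool.noConfusion hc
      · have hs : stepB u = u - 1 := by
          unfold stepB; rw [if_neg h2, if_neg h3]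
        rw [← hs]; simpa using hIH

-- ===== VERDICT =====
theorem bfs_spec : Claim_equal_bfs := by
  intro src _
  unfold Spec_bfs bfs bfs_alt
  have hof : PySem.Dict.ofList ((PySem.List.enumerate (chainB src) 0).map (fun p => (p.2, p.1)))
      = ((PySem.List.enumerate (chainB src) 0).map (fun p => (p.2, p.1))).foldl
          (fun d p => d.insert p.1 p.2) PySem.Dict.empty := rfl
  rw [hof]
  conv_rhs => rw [pvChain_head src, PySem.List.enumerate_cons]
  simp only [List.map_cons, List.foldl_cons]
  congr 1
  have := pvLoop_eq src.toNat src ((PySem.Dict.empty : PySem.Dict Int Int).insert src 0) le_rfl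
    (by
      intro k hk
      rw [PySem.Dict.mem_keys_insert] at hk
      rcases hk with h | h
      · omega
      · simp [PySem.Dict.keys_empty] at h)
  rw [PySem.Dict.getD_insert_self] at this
  simpa using this
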